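-- pv_equiv track=rewrite | github.com/MNRBDI/tsdsrd | importance!/multimodal_rag_observation_basic.py | format_recommendations_to_paragraphs
-- ===== SOURCE A (Python) =====
-- def format_recommendations_to_paragraphs(structured_text: str) -> str:
--     """
--     Convert structured recommendation (with sections like SELECTED RIB SECTION, WHAT I SEE, etc.)
--     into formal paragraph format for better readability.
--     """
--     lines = structured_text.split('\n')
--     paragraphs = []
--     current_section = None
--     current_content = []
--
--     for line in lines:
--         # Preserve the SELECTED RIB SECTION line at top
--         if line.startswith('SELECTED RIB SECTION:'):
--             if current_content and current_section:
--                 section_text = ' '.join([l.strip() for l in current_content if l.strip()])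
--                 if section_text:
--                     paragraphs.append(f"**{current_section}**\n\n{section_text}\n")
--                 current_content = []
--             paragraphs.append(f"## {line}\n")
--             current_section = None
--         # Check for section headers (lines starting with "- " or section names in uppercase)
--         elif line.startswith('- ') and ':' in line:
--             if current_content and current_section:
--                 section_text = ' '.join([l.strip() for l in current_content if l.strip()])
--                 if section_text:
--                     paragraphs.append(f"**{current_section}**\n\n{section_text}\n")
--             current_section = line[2:].rstrip(':').strip()
--             current_content = []
--         elif line.strip() and current_section:
--             current_content.append(line.strip())
--
--     # Save last section
--     if current_content and current_section:
--         section_text = ' '.join([l.strip() for l in current_content if l.strip()])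
--         if section_text:
--             paragraphs.append(f"**{current_section}**\n\n{section_text}\n")
--
--     # Join paragraphs with proper spacing
--     formatted = '\n'.join(paragraphs)
--     return formatted if formatted.strip() else structured_text
-- ===== SOURCE B (Python) =====
-- def format_recommendations_to_paragraphs(structured_text: str) -> str:
--     """Two-pass rewrite: first build typed records (rib lines / sections with
--     their content), then render each record to its paragraph string."""
--     # pass 1: typed records ('rib', line) or ('sec', header, content_list)
--     records = []
--     for line in structured_text.split('\n'):
--         if line.startswith('SELECTED RIB SECTION:'):
--             records.append(('rib', line, None))
--         elif line.startswith('- ') and ':' in line: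
--             records.append(('sec', line[2:].rstrip(':').strip(), []))
--         else:
--             text = line.strip()
--             if text and records and records[-1][0] == 'sec':
--                 records[-1][2].append(text)
--     # pass 2: render
--     parts = []
--     for kind, head, content in records:
--         if kind == 'rib':
--             parts.append(f"## {head}\n")
--         elif head and content:
--             parts.append(f"**{head}**\n\n{' '.join(content)}\n")
--     formatted = '\n'.join(parts)
--     return formatted if formatted.strip() else structured_text
-- ===== Notes on version B (the rewrite author's own statement) =====
-- stated objective: alternative
-- what changed: Replaces A's single stateful loop (current_section/current_content accumulators with a thrice-repeated flush block) by two passes: first build a list of typed records (rib lines, sections with their content), then render each record and join.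
import Mathlib
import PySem

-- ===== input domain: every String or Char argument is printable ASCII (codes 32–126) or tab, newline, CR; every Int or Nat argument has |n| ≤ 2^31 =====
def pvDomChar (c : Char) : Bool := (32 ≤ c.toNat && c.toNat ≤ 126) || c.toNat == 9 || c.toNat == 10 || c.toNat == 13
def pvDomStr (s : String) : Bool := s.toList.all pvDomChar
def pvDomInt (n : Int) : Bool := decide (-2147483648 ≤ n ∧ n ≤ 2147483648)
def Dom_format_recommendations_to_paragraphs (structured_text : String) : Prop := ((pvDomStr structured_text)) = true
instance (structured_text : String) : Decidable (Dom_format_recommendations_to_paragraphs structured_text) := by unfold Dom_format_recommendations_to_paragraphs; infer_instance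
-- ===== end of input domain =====

-- B rewrites the single stateful loop as two passes (build typed records, then render them); objective: alternative decomposition.


-- shared literal fragments (identical expressions in both Pythons)
def pvRibPrefix : List Char := "SELECTED RIB SECTION:".toList

-- line[2:].rstrip(':').strip() — rstrip(':') (drop trailing ':' characters) is ported by hand (exact: the chars-set is the single char ':').
def pvHeader (line : List Char) : List Char :=
  PySem.Chars.strip (((PySem.Chars.slice line (some 2) none).reverse.dropWhile (fun c => c == ':')).reverse)

def pvPara (h : List Char) (text : List Char) : List Char :=
  "**".toList ++ h ++ "**\n\n".toList ++ text ++ ['\n']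

-- ===== PORT A =====
-- Python truthiness of current_section (None or str)
def pvTruthy (o : Option (List Char)) : Bool :=
  match o with
  | some h => !h.isEmpty
  | none => false

-- ' '.join([l.strip() for l in content if l.strip()])
def pvFlushText (content : List (List Char)) : List Char :=
  PySem.Chars.join [' '] ((content.map PySem.Chars.strip).filter (fun t => !t.isEmpty))

-- the thrice-repeated flush block of A
def pvFlushA (P : List (List Char)) (sec : Option (List Char)) (content : List (List Char)) : List (List Char) :=
  if !content.isEmpty && pvTruthy sec then
    let text := pvFlushText content
    if !text.isEmpty then P ++ [pvPara (sec.getD []) text] else P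
  else P

def pvStepA (st : List (List Char) × Option (List Char) × List (List Char)) (line : List Char) :
    List (List Char) × Option (List Char) × List (List Char) :=
  let (P, sec, content) := st
  if PySem.Chars.startswith line pvRibPrefix then
    -- current_content is reset only inside the flush's if-block, exactly as in A
    let P' := pvFlushA P sec content
    let content' := if !content.isEmpty && pvTruthy sec then ([] : List (List Char)) else content
    (P' ++ ["## ".toList ++ line ++ ['\n']], none, content')
  else if PySem.Chars.startswith line "- ".toList && PySem.Chars.isIn [':'] line then
    (pvFlushA P sec content, some (pvHeader line), ([] : List (List Char)))
  else if !(PySem.Chars.strip line).isEmpty && pvTruthy sec then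
    (P, sec, content ++ [PySem.Chars.strip line])
  else
    (P, sec, content)

def format_recommendations_to_paragraphs (structured_text : String) : String :=
  let lines := PySem.Chars.splitOn structured_text.toList "\n".toList
  let st := lines.foldl pvStepA ([], none, [])
  let P := pvFlushA st.1 st.2.1 st.2.2
  let formatted := PySem.Chars.join ['\n'] P
  if !(PySem.Chars.strip formatted).isEmpty then String.ofList formatted else structured_text

-- ===== PORT B =====
inductive PvRec where
  | rib : List Char → PvRec
  | sec : List Char → List (List Char) → PvRec
deriving DecidableEq, Repr

-- pass 1: build typed records (acc kept in reverse; appending to records[-1] = rewriting the head)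
def pvStepB (acc : List PvRec) (line : List Char) : List PvRec :=
  if PySem.Chars.startswith line pvRibPrefix then
    PvRec.rib line :: acc
  else if PySem.Chars.startswith line "- ".toList && PySem.Chars.isIn [':'] line then
    PvRec.sec (pvHeader line) [] :: acc
  else
    let t := PySem.Chars.strip line
    if !t.isEmpty then
      match acc with
      | PvRec.sec h c :: rest => PvRec.sec h (c ++ [t]) :: rest
      | _ => acc
    else acc

-- pass 2: render one record
def pvRender : PvRec → Option (List Char)
  | PvRec.rib l => some ("## ".toList ++ l ++ ['\n'])
  | PvRec.sec h c =>
      if !h.isEmpty && !c.isEmpty then some (pvPara h (PySem.Chars.join [' '] c)) else none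

def format_recommendations_to_paragraphs_alt (structured_text : String) : String :=
  let recs := (PySem.Chars.splitOn structured_text.toList "\n".toList).foldl pvStepB []
  let parts := recs.reverse.filterMap pvRender
  let formatted := PySem.Chars.join ['\n'] parts
  if !(PySem.Chars.strip formatted).isEmpty then String.ofList formatted else structured_text

-- ===== PRECONDITION & SPEC =====
def Spec_format_recommendations_to_paragraphs (structured_text : String) (out : String) : Prop := out = format_recommendations_to_paragraphs_alt structured_text
instance (structured_text : String) (out : String) : Decidable (Spec_format_recommendations_to_paragraphs structured_text out) := by unfold Spec_format_recommendations_to_paragraphs; infer_instance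

-- ===== CLAIM (what is proved, stated in full; the proofs are below) =====
def Claim_equal_format_recommendations_to_paragraphs : Prop := ∀ (structured_text : String), Dom_format_recommendations_to_paragraphs structured_text → Spec_format_recommendations_to_paragraphs structured_text (format_recommendations_to_paragraphs structured_text)

-- ===== LEMMAS AND PROOFS =====

-- every stashed content line is its own strip and nonempty
def pvGood (content : List (List Char)) : Prop :=
  ∀ l ∈ content, PySem.Chars.strip l = l ∧ l ≠ []

-- B's rendered output of a reversed record list
def pvOut (acc : List PvRec) : List (List Char) :=
  acc.reverse.filterMap pvRender

theorem pvOut_cons (r : PvRec) (acc : List PvRec) :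
    pvOut (r :: acc) = pvOut acc ++ (pvRender r).toList := by
  cases h : pvRender r <;> simp [pvOut, h]

-- loop invariant tying A's state to B's (reversed) record list
def pvInv (st : List (List Char) × Option (List Char) × List (List Char)) (acc : List PvRec) : Prop :=
  pvGood st.2.2 ∧
  match st.2.1 with
  | none =>
      st.2.2 = [] ∧ st.1 = pvOut acc ∧
      (∀ h c, acc.head? ≠ some (PvRec.sec h c))
  | some h =>
      ∃ c rest, acc = PvRec.sec h c :: rest ∧
        st.1 = pvOut rest ∧
        (h ≠ [] → c = st.2.2) ∧ (h = [] → st.2.2 = [])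

-- dropWhile drops exactly the takeWhile-prefix (no named Mathlib lemma found; by induction)
theorem pv_dropWhile_eq_drop (p : Char → Bool) (xs : List Char) :
    List.dropWhile p xs = xs.drop (xs.takeWhile p).length := by
  induction xs with
  | nil => rfl
  | cons a l ih => by_cases h : p a <;> simp [h, ih]

theorem pv_dropWhile_take (p : Char → Bool) (m : List Char) (hm : List.dropWhile p m = m) (k : Nat) :
    List.dropWhile p (m.take k) = m.take k := by
  rw [List.dropWhile_eq_self_iff] at *
  intro h
  have hml : 0 < m.length := by simp at h; omega
  simpa [List.getElem_take] using hm hml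

-- str.strip() is idempotent
theorem pv_strip_strip (l : List Char) :
    PySem.Chars.strip (PySem.Chars.strip l) = PySem.Chars.strip l := by
  simp only [PySem.Chars.strip, PySem.Chars.lstrip, PySem.Chars.rstrip]
  set p := PySem.Chars.isspace with hp
  set m := List.dropWhile p l with hm
  have hmm : List.dropWhile p m = m := List.dropWhile_idempotent p l
  have hs : (List.dropWhile p m.reverse).reverse
      = m.take (m.length - (m.reverse.takeWhile p).length) := by
    rw [pv_dropWhile_eq_drop, List.reverse_drop, List.reverse_reverse, List.length_reverse]
  rw [hs, pv_dropWhile_take p m hmm, ← hs, List.reverse_reverse, List.dropWhile_idempotent]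

-- on good content A's re-strip-and-filter join is the plain join B renders
theorem pv_flushText_good (content : List (List Char)) (h : pvGood content) :
    pvFlushText content = PySem.Chars.join [' '] content := by
  unfold pvFlushText
  congr 1
  rw [List.map_congr_left (fun l hl => (h l hl).1)]
  simp only [List.map_id_fun', id]
  exact List.filter_eq_self.mpr (fun l hl => by simpa using (h l hl).2)

theorem pv_join_ne (a : List Char) (rest : List (List Char)) (ha : a ≠ []) :
    PySem.Chars.join [' '] (a :: rest) ≠ [] := by
  cases rest with
  | nil => simpa [PySem.Chars.join_singleton] using ha
  | cons b l => simp [PySem.Chars.join_cons_cons]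

-- unfolding lemmas for the two step functions
theorem pv_stepA_rib (P : List (List Char)) (sec : Option (List Char)) (content : List (List Char))
    (line : List Char) (h1 : PySem.Chars.startswith line pvRibPrefix = true) :
    pvStepA (P, sec, content) line
      = (pvFlushA P sec content ++ ["## ".toList ++ line ++ ['\n']], none,
         if !content.isEmpty && pvTruthy sec then ([] : List (List Char)) else content) := by
  simp only [pvStepA]
  rw [if_pos h1]

theorem pv_stepA_hdr (P : List (List Char)) (sec : Option (List Char)) (content : List (List Char))
    (line : List Char) (h1 : ¬ PySem.Chars.startswith line pvRibPrefix = true)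
    (h2 : (PySem.Chars.startswith line "- ".toList && PySem.Chars.isIn [':'] line) = true) :
    pvStepA (P, sec, content) line
      = (pvFlushA P sec content, some (pvHeader line), ([] : List (List Char))) := by
  simp only [pvStepA]
  rw [if_neg h1, if_pos h2]

theorem pv_stepA_content (P : List (List Char)) (sec : Option (List Char)) (content : List (List Char))
    (line : List Char) (h1 : ¬ PySem.Chars.startswith line pvRibPrefix = true)
    (h2 : ¬ (PySem.Chars.startswith line "- ".toList && PySem.Chars.isIn [':'] line) = true)
    (h3 : (!(PySem.Chars.strip line).isEmpty && pvTruthy sec) = true) :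
    pvStepA (P, sec, content) line = (P, sec, content ++ [PySem.Chars.strip line]) := by
  simp only [pvStepA]
  rw [if_neg h1, if_neg h2, if_pos h3]

theorem pv_stepA_skip (P : List (List Char)) (sec : Option (List Char)) (content : List (List Char))
    (line : List Char) (h1 : ¬ PySem.Chars.startswith line pvRibPrefix = true)
    (h2 : ¬ (PySem.Chars.startswith line "- ".toList && PySem.Chars.isIn [':'] line) = true)
    (h3 : ¬ (!(PySem.Chars.strip line).isEmpty && pvTruthy sec) = true) :
    pvStepA (P, sec, content) line = (P, sec, content) := by
  simp only [pvStepA]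
  rw [if_neg h1, if_neg h2, if_neg h3]

theorem pv_stepB_rib (acc : List PvRec) (line : List Char)
    (h1 : PySem.Chars.startswith line pvRibPrefix = true) :
    pvStepB acc line = PvRec.rib line :: acc := by
  simp only [pvStepB]
  rw [if_pos h1]

theorem pv_stepB_hdr (acc : List PvRec) (line : List Char)
    (h1 : ¬ PySem.Chars.startswith line pvRibPrefix = true)
    (h2 : (PySem.Chars.startswith line "- ".toList && PySem.Chars.isIn [':'] line) = true) :
    pvStepB acc line = PvRec.sec (pvHeader line) [] :: acc := by
  simp only [pvStepB]
  rw [if_neg h1, if_pos h2]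

theorem pv_stepB_blank (acc : List PvRec) (line : List Char)
    (h1 : ¬ PySem.Chars.startswith line pvRibPrefix = true)
    (h2 : ¬ (PySem.Chars.startswith line "- ".toList && PySem.Chars.isIn [':'] line) = true)
    (ht : ¬ (!(PySem.Chars.strip line).isEmpty) = true) :
    pvStepB acc line = acc := by
  simp only [pvStepB]
  rw [if_neg h1, if_neg h2, if_neg ht]

theorem pv_stepB_text (acc : List PvRec) (line : List Char)
    (h1 : ¬ PySem.Chars.startswith line pvRibPrefix = true)
    (h2 : ¬ (PySem.Chars.startswith line "- ".toList && PySem.Chars.isIn [':'] line) = true)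
    (ht : (!(PySem.Chars.strip line).isEmpty) = true) :
    pvStepB acc line
      = (match acc with
         | PvRec.sec h c :: rest => PvRec.sec h (c ++ [PySem.Chars.strip line]) :: rest
         | _ => acc) := by
  simp only [pvStepB]
  rw [if_neg h1, if_neg h2, if_pos ht]

theorem pv_flush_eq (st : List (List Char) × Option (List Char) × List (List Char))
    (acc : List PvRec) (h : pvInv st acc) :
    pvFlushA st.1 st.2.1 st.2.2 = pvOut acc := by
  obtain ⟨P, sec, content⟩ := st
  obtain ⟨hg, hrest⟩ := h
  cases sec with
  | none =>
    obtain ⟨hc, hP, -⟩ := hrest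
    replace hc : content = [] := hc
    replace hP : P = pvOut acc := hP
    rw [hc] at *
    simpa [pvFlushA] using hP
  | some hd =>
    obtain ⟨c, rest, hacc, hP, ha, hb⟩ := hrest
    replace hP : P = pvOut rest := hP
    subst hacc
    by_cases hhd : hd = []
    · subst hhd
      simp [pvFlushA, pvTruthy, pvOut_cons, pvRender, hP]
    · have hc : c = content := ha hhd
      subst hc
      by_cases hce : c = []
      · subst hce
        simp [pvFlushA, pvOut_cons, pvRender, hP]
      · obtain ⟨a, as, rfl⟩ := List.exists_cons_of_ne_nil hce
        have hgood : pvGood (a :: as) := hg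
        have htext : pvFlushText (a :: as) = PySem.Chars.join [' '] (a :: as) :=
          pv_flushText_good _ hgood
        have hne : PySem.Chars.join [' '] (a :: as) ≠ [] :=
          pv_join_ne a as (hgood a (by simp)).2
        simp [pvFlushA, pvTruthy, pvRender, htext, hne, hhd, pvOut_cons, hP]

theorem pv_inv_step (st : List (List Char) × Option (List Char) × List (List Char))
    (acc : List PvRec) (line : List Char) (h : pvInv st acc) :
    pvInv (pvStepA st line) (pvStepB acc line) := by
  obtain ⟨P, sec, content⟩ := st
  have hflush := pv_flush_eq (P, sec, content) acc h
  obtain ⟨hg, hrest⟩ := h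
  by_cases h1 : PySem.Chars.startswith line pvRibPrefix = true
  · -- rib line: section closed on both sides
    have hc' : (if !content.isEmpty && pvTruthy sec then ([] : List (List Char)) else content) = [] := by
      cases sec with
      | none =>
        obtain ⟨hc, -, -⟩ := hrest
        rw [show content = [] from hc]
        simp
      | some hd =>
        obtain ⟨c, rest, -, -, ha, hb⟩ := hrest
        by_cases hhd : hd = []
        · rw [show content = [] from hb hhd]
          simp
        · by_cases hce : content = []
          · rw [hce]; simp
          · rw [if_pos (by simp [pvTruthy, hce, hhd])]
    rw [pv_stepA_rib P sec content line h1, pv_stepB_rib acc line h1, hc']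
    exact ⟨fun l hl => absurd hl (by simp), rfl,
      by rw [pvOut_cons, hflush]; simp [pvRender], fun h c => by simp⟩
  · by_cases h2 : (PySem.Chars.startswith line "- ".toList && PySem.Chars.isIn [':'] line) = true
    · -- header line: fresh open section on both sides
      rw [pv_stepA_hdr P sec content line h1 h2, pv_stepB_hdr acc line h1 h2]
      exact ⟨fun l hl => absurd hl (by simp), [], acc, rfl, hflush, fun _ => rfl, fun _ => rfl⟩
    · by_cases h3 : (!(PySem.Chars.strip line).isEmpty && pvTruthy sec) = true
      · -- content line under an open (truthy) section
        obtain ⟨hne, htr⟩ := Bool.and_eq_true_iff.mp h3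
        cases sec with
        | none => simp [pvTruthy] at htr
        | some hd =>
          have hhd : hd ≠ [] := by
            intro he
            rw [he] at htr
            simp [pvTruthy] at htr
          obtain ⟨c, rest, hacc, hP, ha, -⟩ := hrest
          subst hacc
          have hc : c = content := ha hhd
          subst hc
          rw [pv_stepA_content P (some hd) c line h1 h2 h3,
              pv_stepB_text (PvRec.sec hd c :: rest) line h1 h2 hne]
          refine ⟨?_, c ++ [PySem.Chars.strip line], rest, rfl, hP, fun _ => rfl,
            fun he => absurd he hhd⟩
          intro l hl
          rcases List.mem_append.mp hl with hl | hl
          · exact hg l hl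
          · simp at hl
            subst hl
            exact ⟨pv_strip_strip line, by simpa using hne⟩
      · -- ignored line: A unchanged; B changes only a never-rendered empty-header section
        rw [pv_stepA_skip P sec content line h1 h2 h3]
        by_cases hts : (!(PySem.Chars.strip line).isEmpty) = true
        · -- strip nonempty but section falsy
          have htr : pvTruthy sec = false := by
            cases htr' : pvTruthy sec
            · rfl
            · exact absurd (by simp [hts, htr']) h3
          rw [pv_stepB_text acc line h1 h2 hts]
          cases sec with
          | none =>
            obtain ⟨hc, hP, hhead⟩ := hrest
            cases acc with
            | nil => exact ⟨hg, hc, hP, hhead⟩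
            | cons r rs =>
              cases r with
              | rib l => exact ⟨hg, hc, hP, hhead⟩
              | sec hh cc => exact (hhead hh cc rfl).elim
          | some hd =>
            have hhd : hd = [] := by
              by_contra hne'
              simp [pvTruthy, hne'] at htr
            subst hhd
            obtain ⟨c, rest, hacc, hP, -, hb⟩ := hrest
            subst hacc
            exact ⟨hg, c ++ [PySem.Chars.strip line], rest, rfl, hP,
              fun hne' => absurd rfl hne', fun _ => hb rfl⟩
        · -- blank line: both unchanged
          rw [pv_stepB_blank acc line h1 h2 hts]
          exact ⟨hg, hrest⟩

theorem pv_inv_foldl (lines : List (List Char))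
    (st : List (List Char) × Option (List Char) × List (List Char)) (acc : List PvRec)
    (h : pvInv st acc) :
    pvInv (lines.foldl pvStepA st) (lines.foldl pvStepB acc) := by
  induction lines generalizing st acc with
  | nil => exact h
  | cons l ls ih => exact ih _ _ (pv_inv_step st acc l h)

-- ===== VERDICT (by name: the statement is the Claim_ definition above) =====
theorem format_recommendations_to_paragraphs_spec : Claim_equal_format_recommendations_to_paragraphs := by
  intro s _
  unfold Spec_format_recommendations_to_paragraphs
  unfold format_recommendations_to_paragraphs format_recommendations_to_paragraphs_alt
  have h0 : pvInv (([], none, []) : List (List Char) × Option (List Char) × List (List Char)) ([] : List PvRec) :=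
    ⟨fun l hl => absurd hl (by simp), rfl, rfl, fun h c => by simp⟩
  have h := pv_inv_foldl (PySem.Chars.splitOn s.toList "\n".toList) _ _ h0
  have hfl := pv_flush_eq _ _ h
  simp only [hfl, pvOut]
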